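-- pv_equiv track=rewrite | github.com/miliar/Code_Jam_Webscraper | Solutions_in_python/Problem_155/AudienceStandingSolver.py | algorithm
-- ===== SOURCE A (Python) =====
-- def algorithm(Sint):
--     added = 0
--     standing = 0
--     for i in range(len(Sint)):
--         addedTemp = 0
--         if standing < i and Sint[i] != 0:
--             addedTemp = (i - standing)
--             added = added + addedTemp
--         standing = standing + Sint[i] + addedTemp
--     return added
-- ===== SOURCE B (Python) =====
-- def algorithm(Sint):
--     # Phase 1: prefix-sum table; prefix[i] = Sint[0] + ... + Sint[i-1]
--     prefix = []
--     s = 0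
--     for x in Sint:
--         prefix.append(s)
--         s += x
--     # Phase 2: answer is the largest deficit i - prefix[i] over nonzero groups
--     return max([0] + [i - p for i, (v, p) in enumerate(zip(Sint, prefix)) if v != 0])
-- ===== Notes on version B (the rewrite author's own statement) =====
-- stated objective: alternative
-- what changed: Replaces A's single carry-forward loop (running 'standing' that mixes audience and added people) with two phases: build the prefix-sum table of Sint, then take the max of the deficits i - prefix[i] over positions with a nonzero group.
import Mathlib
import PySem

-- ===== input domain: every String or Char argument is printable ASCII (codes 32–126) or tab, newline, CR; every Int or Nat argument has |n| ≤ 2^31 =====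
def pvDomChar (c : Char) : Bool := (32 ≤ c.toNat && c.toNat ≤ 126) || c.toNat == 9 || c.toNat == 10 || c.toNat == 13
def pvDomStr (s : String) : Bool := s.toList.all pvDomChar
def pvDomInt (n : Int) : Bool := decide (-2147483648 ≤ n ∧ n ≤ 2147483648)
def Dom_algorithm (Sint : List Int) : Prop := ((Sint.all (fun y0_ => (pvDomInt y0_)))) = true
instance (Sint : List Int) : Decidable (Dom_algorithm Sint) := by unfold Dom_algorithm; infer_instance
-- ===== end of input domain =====

-- B replaces A's carry-forward loop by a prefix-sum table followed by a max over deficits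
-- (alternative decomposition, same O(n) cost; return value only, no mutation involved).

-- ===== PORT A =====
-- the loop 'for i in range(len(Sint))' with Sint[i]: structural recursion carrying i, added, standing
def algorithmGo : List Int → Int → Int → Int → Int
  | [], _, added, _ => added
  | x :: rest, i, added, standing =>
    let addedTemp : Int := if standing < i ∧ x ≠ 0 then i - standing else 0
    algorithmGo rest (i + 1) (added + addedTemp) (standing + x + addedTemp)

def algorithm (Sint : List Int) : Int := algorithmGo Sint 0 0 0

-- ===== PORT B =====
def algorithm_alt (Sint : List Int) : Int :=
  -- Phase 1: prefix-sum table (append loop with running sum s)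
  let pref := (Sint.foldl (fun (st : List Int × Int) x => (st.1 ++ [st.2], st.2 + x))
                  (([] : List Int), (0 : Int))).1
  -- Phase 2: max([0] + [i - p for i, (v, p) in enumerate(zip(Sint, prefix)) if v != 0])
  ((PySem.List.enumerate (Sint.zip pref) 0).filterMap
      (fun q => if q.2.1 ≠ 0 then some (q.1 - q.2.2) else none)).foldl max 0

-- ===== PRECONDITION & SPEC =====
def Spec_algorithm (Sint : List Int) (out : Int) : Prop := out = algorithm_alt Sint
instance (Sint : List Int) (out : Int) : Decidable (Spec_algorithm Sint out) := by unfold Spec_algorithm; infer_instance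

-- ===== CLAIM (what is proved, stated in full; the proofs are below) =====
def Claim_equal_algorithm : Prop := ∀ (Sint : List Int), Dom_algorithm Sint → Spec_algorithm Sint (algorithm Sint)

-- ===== LEMMAS AND PROOFS =====

-- proof-side prefix-sum list: pre S p = [p, p + S[0], p + S[0] + S[1], …] (length = length S)
def preList : List Int → Int → List Int
  | [], _ => []
  | x :: xs, p => p :: preList xs (p + x)

theorem foldl_pre (S : List Int) (acc : List Int) (p : Int) :
    (S.foldl (fun (st : List Int × Int) x => (st.1 ++ [st.2], st.2 + x)) (acc, p)).1
      = acc ++ preList S p := by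
  induction S generalizing acc p with
  | nil => simp [preList]
  | cons x xs ih => simp [List.foldl, preList, ih]

theorem algorithmGo_eq (S : List Int) (i : Int) (added p : Int) :
    algorithmGo S i added (added + p)
      = ((PySem.List.enumerate (S.zip (preList S p)) i).filterMap
          (fun q => if q.2.1 ≠ 0 then some (q.1 - q.2.2) else none)).foldl max added := by
  induction S generalizing i added p with
  | nil => simp [algorithmGo, preList]
  | cons x xs ih =>
    simp only [preList, List.zip_cons_cons, PySem.List.enumerate_cons, List.filterMap,
      algorithmGo]
    by_cases hx : x = 0
    · simp only [hx, and_false, ne_eq, not_true_eq_false, if_neg,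
        not_false_eq_true, add_zero]
      simpa using ih (i + 1) added p
    · by_cases hlt : added + p < i
      · simp only [hlt, hx, ne_eq, not_false_eq_true, and_self, if_pos]
        have h1 : added + p + x + (i - (added + p)) = (added + (i - (added + p))) + (p + x) := by
          ring
        rw [h1, ih]
        simp only [List.foldl_cons]
        have h2 : added + (i - (added + p)) = max added (i - p) := by omega
        rw [h2]
      · simp only [hlt, false_and, if_false, add_zero, hx, ne_eq, not_false_eq_true, if_pos]
        have h1 : added + p + x = added + (p + x) := by ring
        rw [h1, ih]
        simp only [List.foldl_cons]
        have h2 : max added (i - p) = added := by omega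
        rw [h2]

-- ===== VERDICT (by name: the statement is the Claim_ definition above) =====
theorem algorithm_spec : Claim_equal_algorithm := by
  intro S _
  unfold Spec_algorithm algorithm algorithm_alt
  rw [foldl_pre S [] 0, List.nil_append]
  have := algorithmGo_eq S 0 0 0
  simpa using this
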